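-- pv_equiv track=rewrite | github.com/sresis/practice-problems | min-drone-energy/min-drone-energy.py | min_drone_energy
-- ===== SOURCE A (Python) =====
-- def min_drone_energy(route):
--   """Return the min energy required."""
--
--   cum_energy = 0
--   min_energy = 0
--   alt_change = 0
--
--   # loop through the list and calculate the change in altitude and correspond change in KWH
--   for i in range(1, len(route)):
--     current_alt = route[i][2]
--     alt_change = current_alt - route[i-1][2]
--     cum_energy += -alt_change
--     if cum_energy < min_energy:
--       min_energy = cum_energy
--
--
--   return -min_energy
-- ===== SOURCE B (Python) =====
-- def min_drone_energy(route):
--   """Return the min energy required."""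
--   if not route:
--     return 0
--   alts = [p[2] for p in route]
--   return max(alts) - alts[0]
-- ===== Notes on version B (the rewrite author's own statement) =====
-- stated objective: simpler
-- what changed: Replaces the running cumulative-energy/minimum scan with a single global reduction: answer = max(altitudes) - first altitude, by the telescoping identity.
import Mathlib
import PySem

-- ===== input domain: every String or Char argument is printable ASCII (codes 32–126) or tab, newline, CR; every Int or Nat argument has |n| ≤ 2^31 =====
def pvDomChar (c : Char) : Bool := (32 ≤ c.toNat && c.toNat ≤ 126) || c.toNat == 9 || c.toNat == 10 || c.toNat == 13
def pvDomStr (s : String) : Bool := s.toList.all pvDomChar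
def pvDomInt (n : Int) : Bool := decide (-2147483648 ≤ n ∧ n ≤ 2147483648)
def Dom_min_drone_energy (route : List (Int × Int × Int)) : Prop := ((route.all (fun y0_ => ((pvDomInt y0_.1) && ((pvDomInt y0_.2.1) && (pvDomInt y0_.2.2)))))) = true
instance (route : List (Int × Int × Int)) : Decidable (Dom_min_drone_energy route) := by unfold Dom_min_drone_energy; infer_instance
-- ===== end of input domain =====

-- B replaces A's running cumulative-energy/minimum scan by the single global reduction
-- max(altitudes) - first altitude (telescoping identity); same O(n) cost, simpler.

-- ===== PORT A =====
-- literal port of A: fold over range(1, len(route)) carrying (cum_energy, min_energy, alt_change)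
def min_drone_energy (route : List (Int × Int × Int)) : Int :=
  -(((PySem.List.pyRange 1 (PySem.List.len route) 1).foldl
    (fun (st : Int × Int × Int) i =>
      let current_alt := (PySem.List.pyGetD route i (0, 0, 0)).2.2
      let alt_change := current_alt - (PySem.List.pyGetD route (i - 1) (0, 0, 0)).2.2
      let cum := st.1 + (-alt_change)
      let mn := if cum < st.2.1 then cum else st.2.1
      (cum, mn, alt_change)) (0, 0, 0)).2.1)

-- ===== PORT B =====
-- literal port of B: empty guard, alts = [p[2] for p in route], max(alts) - alts[0]
def min_drone_energy_alt (route : List (Int × Int × Int)) : Int :=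
  if route = [] then 0
  else
    let alts := route.map (fun p => p.2.2)
    match PySem.List.max? alts (fun y => y) with
    | some m => m - PySem.List.pyGetD alts 0 0
    | none => 0

-- ===== PRECONDITION & SPEC =====
def Spec_min_drone_energy (route : List (Int × Int × Int)) (out : Int) : Prop := out = min_drone_energy_alt route
instance (route : List (Int × Int × Int)) (out : Int) : Decidable (Spec_min_drone_energy route out) := by unfold Spec_min_drone_energy; infer_instance

-- ===== CLAIM (what is proved, stated in full; the proofs are below) =====
def Claim_equal_min_drone_energy : Prop := ∀ (route : List (Int × Int × Int)), Dom_min_drone_energy route → Spec_min_drone_energy route (min_drone_energy route)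

-- ===== LEMMAS AND PROOFS =====

-- xs[i] for 0 ≤ i < len xs is unchanged by appending on the right
theorem pyGetD_append_left' {α : Type} (xs ys : List α) (i : Int) (d : α)
    (h0 : 0 ≤ i) (h : i < (xs.length : Int)) :
    PySem.List.pyGetD (xs ++ ys) i d = PySem.List.pyGetD xs i d := by
  rw [PySem.List.pyGetD_eq_getElem (xs ++ ys) d h0 (by simp; omega),
      PySem.List.pyGetD_eq_getElem xs d h0 (by exact_mod_cast h)]
  exact List.getElem_append_left (by omega)

-- (p :: t)[t.length] is the last element
theorem getD_length_cons {α : Type} : ∀ (t : List α) (p d : α),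
    (p :: t).getD t.length d = t.getLastD p
  | [], _, _ => rfl
  | q :: t, p, d => by
      rw [List.getLastD_cons, show (q :: t).length = t.length + 1 from rfl, List.getD_cons_succ]
      exact getD_length_cons t q d

-- loop invariant for A's fold, by reverse induction on the tail
theorem loopA (t : List (Int × Int × Int)) (p : Int × Int × Int) :
    ∃ c, (PySem.List.pyRange 1 ((t.length : Int) + 1) 1).foldl
      (fun (st : Int × Int × Int) i =>
        let current_alt := (PySem.List.pyGetD (p :: t) i (0, 0, 0)).2.2
        let alt_change := current_alt - (PySem.List.pyGetD (p :: t) (i - 1) (0, 0, 0)).2.2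
        let cum := st.1 + (-alt_change)
        let mn := if cum < st.2.1 then cum else st.2.1
        (cum, mn, alt_change)) (0, 0, 0)
      = (p.2.2 - (t.getLastD p).2.2,
         p.2.2 - (t.map (fun q => q.2.2)).foldl max p.2.2, c) := by
  induction t using List.reverseRecOn with
  | nil =>
      refine ⟨0, ?_⟩
      rw [PySem.List.pyRange_one_eq_nil (by norm_num)]
      simp
  | append_singleton t' q ih =>
      obtain ⟨c', hc'⟩ := ih
      refine ⟨q.2.2 - (t'.getLastD p).2.2, ?_⟩
      have hlen : (((t' ++ [q]).length : Int) + 1) = ((t'.length : Int) + 1) + 1 := by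
        simp [List.length_append]
      rw [hlen, PySem.List.pyRange_one_succ_right (by omega), List.foldl_append]
      -- the prefix of the loop only reads indices < t'.length + 1, so the appended q is invisible
      have hpref :
          (PySem.List.pyRange 1 ((t'.length : Int) + 1) 1).foldl
            (fun (st : Int × Int × Int) i =>
              let current_alt := (PySem.List.pyGetD (p :: (t' ++ [q])) i (0, 0, 0)).2.2
              let alt_change := current_alt - (PySem.List.pyGetD (p :: (t' ++ [q])) (i - 1) (0, 0, 0)).2.2
              let cum := st.1 + (-alt_change)
              let mn := if cum < st.2.1 then cum else st.2.1
              (cum, mn, alt_change)) (0, 0, 0)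
          = (p.2.2 - (t'.getLastD p).2.2,
             p.2.2 - (t'.map (fun r => r.2.2)).foldl max p.2.2, c') := by
        rw [PySem.List.foldl_congr_mem _ _
          (fun (st : Int × Int × Int) i =>
            let current_alt := (PySem.List.pyGetD (p :: t') i (0, 0, 0)).2.2
            let alt_change := current_alt - (PySem.List.pyGetD (p :: t') (i - 1) (0, 0, 0)).2.2
            let cum := st.1 + (-alt_change)
            let mn := if cum < st.2.1 then cum else st.2.1
            (cum, mn, alt_change)) _ ?_]
        · exact hc'
        · intro acc x hx
          rw [PySem.List.mem_pyRange_one] at hx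
          have e1 : PySem.List.pyGetD (p :: (t' ++ [q])) x (0, 0, 0)
              = PySem.List.pyGetD (p :: t') x (0, 0, 0) := by
            rw [show p :: (t' ++ [q]) = (p :: t') ++ [q] from rfl]
            exact pyGetD_append_left' _ _ _ _ (by omega) (by simp; omega)
          have e2 : PySem.List.pyGetD (p :: (t' ++ [q])) (x - 1) (0, 0, 0)
              = PySem.List.pyGetD (p :: t') (x - 1) (0, 0, 0) := by
            rw [show p :: (t' ++ [q]) = (p :: t') ++ [q] from rfl]
            exact pyGetD_append_left' _ _ _ _ (by omega) (by simp; omega)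
          simp only [e1, e2]
      rw [hpref]
      -- the last iteration reads q and the previous last element
      have ecur : PySem.List.pyGetD (p :: (t' ++ [q])) ((t'.length : Int) + 1) (0, 0, 0) = q := by
        have hcast : ((t'.length : Int) + 1) = (((p :: t').length : Nat) : Int) := by
          simp
        rw [show p :: (t' ++ [q]) = (p :: t') ++ [q] from rfl, hcast,
            PySem.List.pyGetD_natCast]
        simp [List.getD]
      have eprev : PySem.List.pyGetD (p :: (t' ++ [q])) (((t'.length : Int) + 1) - 1) (0, 0, 0)
          = t'.getLastD p := by
        have hidx : (((t'.length : Int) + 1) - 1) = ((t'.length : Nat) : Int) := by ring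
        rw [show p :: (t' ++ [q]) = (p :: t') ++ [q] from rfl, hidx,
            pyGetD_append_left' _ _ _ _ (by omega) (by simp),
            PySem.List.pyGetD_natCast, getD_length_cons]
      simp only [List.foldl_cons, List.foldl_nil, ecur, eprev, List.getLastD_concat,
        List.map_append, List.map_cons, List.map_nil, List.foldl_append,
        Prod.mk.injEq]
      refine ⟨by ring, ?_, trivial⟩
      have hcum : p.2.2 - (t'.getLastD p).2.2 + -(q.2.2 - (t'.getLastD p).2.2)
          = p.2.2 - q.2.2 := by ring
      rw [hcum]
      split_ifs with hif <;> omega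

-- ===== VERDICT (by name: the statement is the Claim_ definition above) =====
theorem min_drone_energy_spec : Claim_equal_min_drone_energy := by
  intro route _
  unfold Spec_min_drone_energy min_drone_energy min_drone_energy_alt
  cases route with
  | nil => simp [PySem.List.pyRange_one_eq_nil]
  | cons p t =>
      obtain ⟨c, hc⟩ := loopA t p
      have hb : PySem.List.len (p :: t) = (t.length : Int) + 1 := by
        simp [PySem.List.len_eq]
      rw [hb, hc]
      simp only [List.map_cons, if_neg (List.cons_ne_nil p t),
        PySem.List.max?_id_cons, PySem.List.pyGetD_zero_cons]
      ring
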